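-- pv_equiv track=rewrite | github.com/ron128/chimerascan | chimerascan/lib/gene_to_genome2.py | gene_to_genome_pos
-- ===== SOURCE A (Python) =====
-- def gene_to_genome_pos(rname, pos, gene_genome_map):
--     '''
--     translate gene 'rname' position 'gene_pos' to genomic
--     coordinates.  returns a 3-tuple with (chrom, strand, pos)
--     '''
--     chrom, strand, intervals = gene_genome_map[rname]
--     offset = 0
--     for start, end, in intervals:
--         exon_size = end - start
--         if pos < offset + exon_size:
--             if strand:
--                 return chrom, strand, start + exon_size - (pos - offset) - 1
--             else:
--                 return chrom, strand, start + (pos - offset)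
--         #print start, end, offset, pos
--         offset += exon_size
--     return None
-- ===== SOURCE B (Python) =====
-- def gene_to_genome_pos(rname, pos, gene_genome_map):
--     chrom, strand, intervals = gene_genome_map[rname]
--     cum = []
--     total = 0
--     for start, end in intervals:
--         total += end - start
--         cum.append(total)
--     i = next((k for k, c in enumerate(cum) if pos < c), len(cum))
--     if i == len(cum):
--         return None
--     offset = cum[i - 1] if i > 0 else 0
--     start, end = intervals[i]
--     exon_size = end - start
--     if strand:
--         return chrom, strand, start + exon_size - (pos - offset) - 1
--     return chrom, strand, start + (pos - offset)
-- ===== Notes on version B (the rewrite author's own statement) =====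
-- stated objective: alternative
-- what changed: Replaces A's interleaved running-offset scan (offset updated and tested inside one loop with early returns) by a two-phase form: first build the cumulative-exon-size list, then locate the target exon as the first index whose cumulative value exceeds pos, and apply the strand formula once via indexed lookup.
import Mathlib
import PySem

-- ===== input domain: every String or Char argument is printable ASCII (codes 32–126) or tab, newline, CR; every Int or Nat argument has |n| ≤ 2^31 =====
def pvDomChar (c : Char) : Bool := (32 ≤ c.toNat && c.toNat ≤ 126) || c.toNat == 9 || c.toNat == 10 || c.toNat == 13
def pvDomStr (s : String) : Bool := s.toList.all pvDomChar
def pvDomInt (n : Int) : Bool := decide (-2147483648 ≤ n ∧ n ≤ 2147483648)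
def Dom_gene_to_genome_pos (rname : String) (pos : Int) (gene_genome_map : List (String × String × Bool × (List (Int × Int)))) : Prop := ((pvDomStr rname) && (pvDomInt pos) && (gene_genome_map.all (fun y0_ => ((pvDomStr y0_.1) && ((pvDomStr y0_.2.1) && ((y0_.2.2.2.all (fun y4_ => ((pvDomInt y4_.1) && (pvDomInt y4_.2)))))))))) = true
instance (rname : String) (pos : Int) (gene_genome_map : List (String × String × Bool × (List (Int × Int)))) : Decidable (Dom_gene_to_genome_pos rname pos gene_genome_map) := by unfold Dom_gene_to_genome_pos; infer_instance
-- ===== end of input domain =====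

-- B replaces A's interleaved running-offset scan with a two-phase form (build the
-- cumulative-size list, locate the first index whose cumulative value exceeds pos,
-- apply the strand formula once by indexed lookup); same O(n) cost, different structure.


-- ===== PORT A =====
-- A's loop: running offset, first exon with pos < offset + exon_size wins
def goA (chrom : String) (strand : Bool) (pos : Int) : List (Int × Int) → Int → Option (String × Bool × Int)
  | [], _ => none
  | (s, e) :: rest, offset =>
    let size := e - s
    if pos < offset + size then
      if strand then some (chrom, strand, s + size - (pos - offset) - 1)
      else some (chrom, strand, s + (pos - offset))
    else goA chrom strand pos rest (offset + size)

def gene_to_genome_pos (rname : String) (pos : Int) (gene_genome_map : List (String × String × Bool × (List (Int × Int)))) : Option (String × Bool × Int) :=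
  match gene_genome_map.find? (fun kv => kv.1 == rname) with
  | none => none  -- Python raises KeyError here; excluded by Pre_
  | some (_, chrom, strand, intervals) => goA chrom strand pos intervals 0

-- ===== PORT B =====
-- Source B's first loop: the cumulative exon-size list (append of the running total)
def cumFrom (t : Int) : List (Int × Int) → List Int
  | [] => []
  | (s, e) :: rest => (t + (e - s)) :: cumFrom (t + (e - s)) rest

-- Source B's `next((k for k, c in enumerate(cum) if pos < c), len(cum))`
def firstGt (pos : Int) : List Int → Nat
  | [] => 0
  | c :: rest => if pos < c then 0 else 1 + firstGt pos rest

def gene_to_genome_pos_alt (rname : String) (pos : Int) (gene_genome_map : List (String × String × Bool × (List (Int × Int)))) : Option (String × Bool × Int) :=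
  match gene_genome_map.find? (fun kv => kv.1 == rname) with
  | none => none  -- Python raises KeyError here; excluded by Pre_
  | some (_, chrom, strand, intervals) =>
    let cum := cumFrom 0 intervals
    let i := firstGt pos cum
    if i = cum.length then none
    else
      let offset := if 0 < i then cum.getD (i - 1) 0 else 0
      let p := intervals.getD i (0, 0)
      let size := p.2 - p.1
      if strand then some (chrom, strand, p.1 + size - (pos - offset) - 1)
      else some (chrom, strand, p.1 + (pos - offset))

-- ===== PRECONDITION & SPEC =====
-- Pre_ excludes exactly the inputs where Python A raises KeyError (rname not a key of the
-- map); B's Python raises the same KeyError there.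
def Pre_gene_to_genome_pos (rname : String) (pos : Int) (gene_genome_map : List (String × String × Bool × (List (Int × Int)))) : Prop :=
  (gene_genome_map.find? (fun kv => kv.1 == rname)).isSome = true
instance (rname : String) (pos : Int) (gene_genome_map : List (String × String × Bool × (List (Int × Int)))) : Decidable (Pre_gene_to_genome_pos rname pos gene_genome_map) := by unfold Pre_gene_to_genome_pos; infer_instance

def pvWitness_gene_to_genome_pos : String × Int × (List (String × String × Bool × (List (Int × Int)))) :=
  ("g", 1, [("g", "chr1", false, [(0, 3)])])

def Spec_gene_to_genome_pos (rname : String) (pos : Int) (gene_genome_map : List (String × String × Bool × (List (Int × Int)))) (out : Option (String × Bool × Int)) : Prop := out = gene_to_genome_pos_alt rname pos gene_genome_map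
instance (rname : String) (pos : Int) (gene_genome_map : List (String × String × Bool × (List (Int × Int)))) (out : Option (String × Bool × Int)) : Decidable (Spec_gene_to_genome_pos rname pos gene_genome_map out) := by unfold Spec_gene_to_genome_pos; infer_instance

-- ===== CLAIM (what is proved, stated in full; the proofs are below) =====
def Claim_equal_gene_to_genome_pos : Prop := ∀ (rname : String) (pos : Int) (gene_genome_map : List (String × String × Bool × (List (Int × Int)))), Dom_gene_to_genome_pos rname pos gene_genome_map → Pre_gene_to_genome_pos rname pos gene_genome_map → Spec_gene_to_genome_pos rname pos gene_genome_map (gene_to_genome_pos rname pos gene_genome_map)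

-- ===== LEMMAS AND PROOFS =====

-- B's core, generalized over the base offset t (Source B runs it with t = 0)
def bcore (chrom : String) (strand : Bool) (pos : Int) (t : Int) (intervals : List (Int × Int)) : Option (String × Bool × Int) :=
  let cum := cumFrom t intervals
  let i := firstGt pos cum
  if i = cum.length then none
  else
    let offset := if 0 < i then cum.getD (i - 1) 0 else t
    let p := intervals.getD i (0, 0)
    let size := p.2 - p.1
    if strand then some (chrom, strand, p.1 + size - (pos - offset) - 1)
    else some (chrom, strand, p.1 + (pos - offset))

theorem goA_eq_bcore (chrom : String) (strand : Bool) (pos : Int) (l : List (Int × Int)) (t : Int) :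
    goA chrom strand pos l t = bcore chrom strand pos t l := by
  induction l generalizing t with
  | nil => simp [goA, bcore, cumFrom, firstGt]
  | cons hd tl ih =>
    obtain ⟨s, e⟩ := hd
    by_cases hlt : pos < t + (e - s)
    · simp [goA, bcore, cumFrom, firstGt, hlt]
    · have := ih (t + (e - s))
      simp [goA, bcore, cumFrom, firstGt, hlt] at this ⊢
      rw [this]
      rcases hk : firstGt pos (cumFrom (t + (e - s)) tl) with _ | k
      · rcases cumFrom (t + (e - s)) tl with _ | ⟨c, cs⟩ <;> simp
      · have h12 : 1 + (k + 1) = k + 2 := by omega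
        rcases cumFrom (t + (e - s)) tl with _ | ⟨c, cs⟩ <;> simp [h12]

-- ===== VERDICT (by name: the statement is the Claim_ definition above) =====
theorem gene_to_genome_pos_spec : Claim_equal_gene_to_genome_pos := by
  intro rname pos m _ hpre
  unfold Spec_gene_to_genome_pos
  unfold gene_to_genome_pos gene_to_genome_pos_alt
  rcases hfind : m.find? (fun kv => kv.1 == rname) with _ | v
  · unfold Pre_gene_to_genome_pos at hpre
    simp [hfind] at hpre
  · obtain ⟨_, chrom, strand, intervals⟩ := v
    simp only [hfind]
    exact goA_eq_bcore chrom strand pos intervals 0
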